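-- pv_equiv track=rewrite | github.com/Aimer779/pdf2md | pdf2md.py | _compute_page_ranges
-- ===== SOURCE A (Python) =====
-- def _compute_page_ranges(items, total_pages):
--     """将 [(name, page_1based, level), ...] 转换为 [(name, start_0, end_0, level), ...]。"""
--     items.sort(key=lambda x: x[1])
--     chapters = []
--     for i, (name, page, level) in enumerate(items):
--         start = page - 1
--         end = (max(items[i + 1][1] - 2, start) if i + 1 < len(items) else total_pages - 1)
--         chapters.append((name, start, end, level))
--     return chapters
-- ===== SOURCE B (Python) =====
-- def _compute_page_ranges(items, total_pages):
--     """Backward single pass: sort, then compute each end from the start just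
--     computed for the following chapter (last chapter first), and reverse.
--     Like A, this sorts `items` in place."""
--     items.sort(key=lambda x: x[1])
--     if not items:
--         return []
--     name, page, level = items[-1]
--     out = [(name, page - 1, total_pages - 1, level)]
--     next_start = page - 1
--     for name, page, level in reversed(items[:-1]):
--         start = page - 1
--         out.append((name, start, max(next_start - 1, start), level))
--         next_start = start
--     out.reverse()
--     return out
-- ===== Notes on version B (the rewrite author's own statement) =====
-- stated objective: alternative
-- what changed: Replaces A's forward loop with indexed lookahead items[i+1] by a backward single pass that threads next_start (the start just computed for the following chapter) and reverses the result, special-casing the unclamped last chapter.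
import Mathlib
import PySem

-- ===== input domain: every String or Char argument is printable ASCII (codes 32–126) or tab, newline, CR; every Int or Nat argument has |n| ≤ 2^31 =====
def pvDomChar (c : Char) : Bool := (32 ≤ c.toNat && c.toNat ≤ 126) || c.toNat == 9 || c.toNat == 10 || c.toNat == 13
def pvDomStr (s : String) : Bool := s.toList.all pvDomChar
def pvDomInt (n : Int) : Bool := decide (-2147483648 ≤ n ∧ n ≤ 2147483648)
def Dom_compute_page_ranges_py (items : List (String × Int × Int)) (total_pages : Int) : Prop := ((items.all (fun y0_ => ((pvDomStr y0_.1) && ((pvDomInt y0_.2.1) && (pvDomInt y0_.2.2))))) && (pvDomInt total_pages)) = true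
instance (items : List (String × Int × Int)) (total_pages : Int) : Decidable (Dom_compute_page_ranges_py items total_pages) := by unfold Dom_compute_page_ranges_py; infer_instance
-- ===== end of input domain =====

-- B replaces A's forward loop with indexed lookahead by a backward pass that reuses the
-- start just computed for the following chapter; return values proved equal (both Pythons
-- also sort `items` in place, an identical side effect not covered by the theorem).

-- ===== PORT A =====
-- A's loop: for each i, end = max(items[i+1][1] - 2, start) if i+1 < len(items) else total_pages - 1;
-- the lookahead items[i+1] (guarded in range) is the head of the remaining list.
def goA : List (String × Int × Int) → Int → List (String × Int × Int × Int)
  | [], _ => []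
  | (name, page, level) :: rest, tp =>
    let start := page - 1
    let e := match rest with
      | (_, p2, _) :: _ => max (p2 - 2) start
      | [] => tp - 1
    (name, start, e, level) :: goA rest tp

def compute_page_ranges_py (items : List (String × Int × Int)) (total_pages : Int) : List (String × Int × Int × Int) :=
  goA (PySem.List.sorted items (fun x => x.2.1)) total_pages

-- ===== PORT B =====
-- Source B's backward loop over reversed(items[:-1]), threading next_start; the accumulated
-- list is reversed at the end (out.reverse()).
def goB (next_start : Int) : List (String × Int × Int) → List (String × Int × Int × Int)
  | [] => []
  | (name, page, level) :: rest =>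
    let start := page - 1
    (name, start, max (next_start - 1) start, level) :: goB start rest

def compute_page_ranges_py_alt (items : List (String × Int × Int)) (total_pages : Int) : List (String × Int × Int × Int) :=
  let s := PySem.List.sorted items (fun x => x.2.1)
  match s.reverse with            -- head = items[-1], tail = reversed(items[:-1])
  | [] => []
  | (name, page, level) :: revInit =>
    ((name, page - 1, total_pages - 1, level) :: goB (page - 1) revInit).reverse

-- ===== PRECONDITION & SPEC =====
def Spec_compute_page_ranges_py (items : List (String × Int × Int)) (total_pages : Int) (out : List (String × Int × Int × Int)) : Prop := out = compute_page_ranges_py_alt items total_pages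
instance (items : List (String × Int × Int)) (total_pages : Int) (out : List (String × Int × Int × Int)) : Decidable (Spec_compute_page_ranges_py items total_pages out) := by unfold Spec_compute_page_ranges_py; infer_instance

-- ===== CLAIM (what is proved, stated in full; the proofs are below) =====
def Claim_equal_compute_page_ranges_py : Prop := ∀ (items : List (String × Int × Int)) (total_pages : Int), Dom_compute_page_ranges_py items total_pages → Spec_compute_page_ranges_py items total_pages (compute_page_ranges_py items total_pages)

-- ===== LEMMAS AND PROOFS =====

-- threading of next_start across an element appended at the end of goB's input
theorem goB_append_last (ns : Int) (ys : List (String × Int × Int)) (y : String × Int × Int) :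
    goB ns (ys ++ [y]) =
      goB ns ys ++ [(y.1, y.2.1 - 1, max ((match ys.getLast? with
        | some z => z.2.1 - 1
        | none => ns) - 1) (y.2.1 - 1), y.2.2)] := by
  induction ys generalizing ns with
  | nil => simp [goB]
  | cons z zs ih =>
    obtain ⟨n1, p1, l1⟩ := z
    simp only [List.cons_append, goB, ih (p1 - 1)]
    cases zs with
    | nil => simp
    | cons w ws =>
      rcases hz : (w :: ws).getLast? with _ | u
      · simp at hz
      · simp [hz]

-- the key correspondence: A's forward pass on xs ++ [x] equals B's reversed backward pass
theorem goA_eq_rev (xs : List (String × Int × Int)) (n : String) (p l tp : Int) :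
    goA (xs ++ [(n, p, l)]) tp =
      ((n, p - 1, tp - 1, l) :: goB (p - 1) xs.reverse).reverse := by
  induction xs with
  | nil => simp [goA, goB]
  | cons x xs ih =>
    obtain ⟨n1, p1, l1⟩ := x
    cases xs with
    | nil =>
      simp [goA, goB]
      omega
    | cons y ys =>
      obtain ⟨n2, p2, l2⟩ := y
      have hstep : goA (((n1, p1, l1) :: (n2, p2, l2) :: ys) ++ [(n, p, l)]) tp
          = (n1, p1 - 1, max (p2 - 2) (p1 - 1), l1)
              :: goA (((n2, p2, l2) :: ys) ++ [(n, p, l)]) tp := rfl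
      have hrev : ((n1, p1, l1) :: (n2, p2, l2) :: ys).reverse
          = ((n2, p2, l2) :: ys).reverse ++ [(n1, p1, l1)] := by simp
      have hlast : ((n2, p2, l2) :: ys).reverse.getLast? = some (n2, p2, l2) := by
        simp [List.getLast?_reverse]
      rw [hstep, ih, hrev, goB_append_last, hlast]
      simp only [List.reverse_cons, List.reverse_append]
      simp
      omega

-- ===== VERDICT (by name: the statement is the Claim_ definition above) =====
theorem compute_page_ranges_py_spec : Claim_equal_compute_page_ranges_py := by
  intro items tp _
  unfold Spec_compute_page_ranges_py compute_page_ranges_py compute_page_ranges_py_alt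
  rcases (PySem.List.sorted items (fun x => x.2.1)).eq_nil_or_concat with h | ⟨xs, x, h⟩
  · simp [h, goA]
  · obtain ⟨n, p, l⟩ := x
    rw [List.concat_eq_append] at h
    simp [h, goA_eq_rev]
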